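-- pv_equiv track=rewrite | github.com/HelgDemidov/solid_verifier | solid_dashboard/adapters/import_graph_adapter.py | _resolve_external_layer
-- ===== SOURCE A (Python) =====
-- from typing import Any, DefaultDict, Dict, List, Optional, Set, Tuple
--
-- def _resolve_external_layer(
--
--     module_name: str,
--     external_layer_config: Dict[str, List[str]],
-- ) -> Optional[str]:
--     """
--     Ищет внешний слой для third-party модуля.
--
--     Пример:
--     - модуль "sqlalchemy.orm"
--     - внешний слой "db_libs": ["sqlalchemy"]
--     - результат: "db_libs"
--     """
--     for layer_name, package_prefixes in external_layer_config.items():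
--         for package_prefix in package_prefixes:
--             if (
--                 module_name == package_prefix
--                 or module_name.startswith(f"{package_prefix}.")
--             ):
--                 return layer_name
--     return None
-- ===== SOURCE B (Python) =====
-- def _resolve_external_layer(module_name, external_layer_config):
--     # Precompute the set of dot-boundary prefixes of module_name
--     # (module_name itself plus module_name[:i] for every '.' at position i),
--     # then return the first layer whose prefix list intersects that set.
--     candidates = {module_name}
--     for i, ch in enumerate(module_name):
--         if ch == ".":
--             candidates.add(module_name[:i])
--     for layer_name, package_prefixes in external_layer_config.items():
--         if not candidates.isdisjoint(package_prefixes):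
--             return layer_name
--     return None
-- ===== Notes on version B (the rewrite author's own statement) =====
-- stated objective: alternative
-- what changed: B precomputes once the set of dot-boundary prefixes of module_name and returns the first layer whose prefix list intersects it, instead of testing every config prefix with == / startswith against module_name.
import Mathlib
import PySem

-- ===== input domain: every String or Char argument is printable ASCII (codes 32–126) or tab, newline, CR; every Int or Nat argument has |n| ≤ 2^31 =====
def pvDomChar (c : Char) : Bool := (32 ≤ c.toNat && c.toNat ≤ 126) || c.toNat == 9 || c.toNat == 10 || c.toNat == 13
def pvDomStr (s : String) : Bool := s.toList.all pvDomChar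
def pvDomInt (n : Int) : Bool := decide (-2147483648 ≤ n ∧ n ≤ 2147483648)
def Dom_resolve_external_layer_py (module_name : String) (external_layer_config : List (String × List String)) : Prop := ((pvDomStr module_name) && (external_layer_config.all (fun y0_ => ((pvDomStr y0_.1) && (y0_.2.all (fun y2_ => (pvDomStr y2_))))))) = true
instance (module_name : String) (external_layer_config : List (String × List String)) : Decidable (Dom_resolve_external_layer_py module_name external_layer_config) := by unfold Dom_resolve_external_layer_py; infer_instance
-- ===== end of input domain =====

-- B precomputes the set of dot-boundary prefixes of module_name once and returns the
-- first layer whose prefix list intersects it (alternative decomposition, same cost class).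

-- ===== PORT A =====
-- inner 'for package_prefix in package_prefixes' loop: true iff some prefix matches
def aScanPrefixes (module_name : String) : List String → Bool
  | [] => false
  | p :: rest =>
    if module_name == p || PySem.Str.startswith module_name (p ++ ".") then true
    else aScanPrefixes module_name rest

-- outer 'for layer_name, package_prefixes in external_layer_config.items()' loop
def aScanLayers (module_name : String) : List (String × List String) → Option String
  | [] => none
  | (layer_name, package_prefixes) :: rest =>
    if aScanPrefixes module_name package_prefixes then some layer_name
    else aScanLayers module_name rest

def resolve_external_layer_py (module_name : String) (external_layer_config : List (String × List String)) : Option String :=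
  aScanLayers module_name external_layer_config

-- ===== PORT B =====
-- candidates = {module_name}; for i, ch in enumerate(module_name): if ch == '.': candidates.add(module_name[:i])
def bCandidates (module_name : String) : PySem.Set String :=
  (PySem.List.enumerate module_name.toList 0).foldl
    (fun acc ic =>
      if ic.2 = '.' then PySem.Set.add acc (PySem.Str.slice module_name none (some ic.1))
      else acc)
    (PySem.Set.ofList [module_name])

-- for layer_name, package_prefixes in ...: if not candidates.isdisjoint(package_prefixes): return layer_name
def bScanLayers (candidates : PySem.Set String) : List (String × List String) → Option String
  | [] => none
  | (layer_name, package_prefixes) :: rest =>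
    if PySem.Set.isdisjoint candidates package_prefixes then bScanLayers candidates rest
    else some layer_name

def resolve_external_layer_py_alt (module_name : String) (external_layer_config : List (String × List String)) : Option String :=
  bScanLayers (bCandidates module_name) external_layer_config

-- ===== PRECONDITION & SPEC =====
def Spec_resolve_external_layer_py (module_name : String) (external_layer_config : List (String × List String)) (out : Option String) : Prop := out = resolve_external_layer_py_alt module_name external_layer_config
instance (module_name : String) (external_layer_config : List (String × List String)) (out : Option String) : Decidable (Spec_resolve_external_layer_py module_name external_layer_config out) := by unfold Spec_resolve_external_layer_py; infer_instance

-- ===== CLAIM (what is proved, stated in full; the proofs are below) =====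
def Claim_equal_resolve_external_layer_py : Prop := ∀ (module_name : String) (external_layer_config : List (String × List String)), Dom_resolve_external_layer_py module_name external_layer_config → Spec_resolve_external_layer_py module_name external_layer_config (resolve_external_layer_py module_name external_layer_config)

-- ===== LEMMAS AND PROOFS =====

-- membership in the candidate-building fold
theorem mem_foldl_add_if {α β : Type} [BEq α] [LawfulBEq α] (l : List β) (s : PySem.Set α)
    (P : β → Prop) [DecidablePred P] (f : β → α) (x : α) :
    x ∈ l.foldl (fun acc ic => if P ic then PySem.Set.add acc (f ic) else acc) s ↔
      x ∈ s ∨ ∃ ic ∈ l, P ic ∧ x = f ic := by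
  induction l generalizing s with
  | nil => simp
  | cons b bs ih =>
    simp only [List.foldl_cons]
    by_cases hb : P b
    · rw [if_pos hb, ih]
      simp only [PySem.Set.mem_add, List.mem_cons]
      aesop
    · rw [if_neg hb, ih]
      simp only [List.mem_cons]
      aesop

-- a suffix of module_name's chars starting with '.' ⟺ a dot at some index, prefix = take
theorem prefix_dot_iff (l q : List Char) :
    q ++ ['.'] <+: l ↔ ∃ i, ∃ h : i < l.length, l[i] = '.' ∧ q = l.take i := by
  constructor
  · rintro ⟨t, ht⟩
    subst ht
    refine ⟨q.length, by simp, ?_, ?_⟩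
    · simp
    · simp
  · rintro ⟨i, h, hdot, rfl⟩
    have hstep : l.take i ++ ['.'] = l.take (i + 1) := by
      rw [List.take_add_one]
      simp [List.getElem?_eq_getElem h, hdot]
    rw [hstep]
    exact List.take_prefix _ _

-- characterization of the candidate set
theorem mem_bCandidates (m x : String) :
    x ∈ bCandidates m ↔
      x = m ∨ ∃ i, ∃ h : i < m.toList.length, m.toList[i] = '.' ∧ x.toList = m.toList.take i := by
  unfold bCandidates
  rw [mem_foldl_add_if]
  constructor
  · rintro (hx | ⟨ic, hic, hdot, rfl⟩)
    · left
      simpa [PySem.Set.mem_ofList] using hx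
    · right
      rw [PySem.List.mem_enumerate_iff] at hic
      obtain ⟨k, hk, rfl⟩ := hic
      refine ⟨k, hk, by simpa using hdot, ?_⟩
      have : ((0 : Int) + (k : Nat)) = ((k : Nat) : Int) := by ring
      rw [this, PySem.Str.toList_slice, PySem.Chars.slice_eq_listSlice,
        PySem.List.slice_to_natCast]
  · rintro (rfl | ⟨i, h, hdot, hx⟩)
    · left
      simp [PySem.Set.mem_ofList]
    · right
      refine ⟨(((i : Nat) : Int), m.toList[i]), ?_, by simpa using hdot, ?_⟩
      · rw [PySem.List.mem_enumerate_iff]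
        exact ⟨i, h, by simp⟩
      · apply String.toList_inj.mp
        rw [hx, PySem.Str.toList_slice, PySem.Chars.slice_eq_listSlice,
          PySem.List.slice_to_natCast]

-- A's per-prefix test, as a Prop on characters
theorem aMatch_iff (m p : String) :
    (m == p || PySem.Str.startswith m (p ++ ".")) = true ↔
      p = m ∨ ∃ i, ∃ h : i < m.toList.length, m.toList[i] = '.' ∧ p.toList = m.toList.take i := by
  rw [Bool.or_eq_true, beq_iff_eq, PySem.Str.startswith_eq, PySem.Chars.startswith_iff]
  have htl : (p ++ ".").toList = p.toList ++ ['.'] := by simp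
  rw [htl, prefix_dot_iff]
  constructor
  · rintro (rfl | h)
    · exact Or.inl rfl
    · exact Or.inr h
  · rintro (rfl | h)
    · exact Or.inl rfl
    · exact Or.inr h

-- A's inner loop returns true iff some prefix matches
theorem aScan_true_iff (m : String) (ps : List String) :
    aScanPrefixes m ps = true ↔
      ∃ p ∈ ps, (m == p || PySem.Str.startswith m (p ++ ".")) = true := by
  induction ps with
  | nil => simp [aScanPrefixes]
  | cons q qs ih =>
    simp only [aScanPrefixes]
    by_cases hq : (m == q || PySem.Str.startswith m (q ++ ".")) = true
    · rw [if_pos hq]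
      exact ⟨fun _ => ⟨q, List.mem_cons_self, hq⟩, fun _ => rfl⟩
    · rw [if_neg hq, ih]
      constructor
      · rintro ⟨p, hp, h⟩
        exact ⟨p, List.mem_cons_of_mem q hp, h⟩
      · rintro ⟨p, hp, h⟩
        rcases List.mem_cons.mp hp with rfl | hp'
        · exact absurd h hq
        · exact ⟨p, hp', h⟩

-- per-layer loops agree
theorem scan_eq (m : String) (ps : List String) :
    aScanPrefixes m ps = !(PySem.Set.isdisjoint (bCandidates m) ps) := by
  have h1 : aScanPrefixes m ps = true ↔ ∃ x ∈ bCandidates m, x ∈ ps := by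
    rw [aScan_true_iff]
    constructor
    · rintro ⟨p, hp, hmatch⟩
      exact ⟨p, (mem_bCandidates m p).mpr ((aMatch_iff m p).mp hmatch), hp⟩
    · rintro ⟨x, hx, hxps⟩
      exact ⟨x, hxps, (aMatch_iff m x).mpr ((mem_bCandidates m x).mp hx)⟩
  cases hd : PySem.Set.isdisjoint (bCandidates m) ps
  · rw [Bool.not_false, h1]
    have := (Bool.not_eq_true _).mpr hd
    rw [PySem.Set.isdisjoint_iff] at this
    push Not at this
    obtain ⟨x, hx, hxps⟩ := this
    exact ⟨x, hx, hxps⟩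
  · rw [Bool.not_true, Bool.eq_false_iff, Ne, h1]
    rw [PySem.Set.isdisjoint_iff] at hd
    rintro ⟨x, hx, hxps⟩
    exact hd x hx hxps

theorem layers_eq (m : String) (cfg : List (String × List String)) :
    aScanLayers m cfg = bScanLayers (bCandidates m) cfg := by
  induction cfg with
  | nil => rfl
  | cons hd tl ih =>
    obtain ⟨layer, ps⟩ := hd
    simp only [aScanLayers, bScanLayers, scan_eq]
    cases h : PySem.Set.isdisjoint (bCandidates m) ps <;> simp [ih]

-- ===== VERDICT (by name: the statement is the Claim_ definition above) =====
theorem resolve_external_layer_py_spec : Claim_equal_resolve_external_layer_py := by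
  intro m cfg _
  show resolve_external_layer_py m cfg = resolve_external_layer_py_alt m cfg
  simpa [resolve_external_layer_py, resolve_external_layer_py_alt] using layers_eq m cfg
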